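-- pv_equiv track=rewrite | github.com/Thxramm/parcial.4.ThiareGomez | parcial.4.ThiareGomez.py | validar_codigo
-- ===== SOURCE A (Python) =====
-- def validar_codigo(codigo):
--     if len(codigo) < 6:
--         return False
--     if not any(c.isupper() for c in codigo):
--         return False
--     if not any(c.isdigit() for c in codigo):
--         return False
--     if ' ' in codigo:
--         return False
--     return True
-- ===== SOURCE B (Python) =====
-- def validar_codigo(codigo):
--     if len(codigo) < 6:
--         return False
--     has_upper = False
--     has_digit = False
--     for c in codigo:
--         if c == ' ':
--             return False
--         if c.isupper():
--             has_upper = True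
--         if c.isdigit():
--             has_digit = True
--     return has_upper and has_digit
-- ===== Notes on version B (the rewrite author's own statement) =====
-- stated objective: alternative
-- what changed: Replaces A's three independent full scans (any-upper, any-digit, substring membership of ' ') with a single pass over the characters maintaining two flags and returning False immediately on a space.
import Mathlib
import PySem

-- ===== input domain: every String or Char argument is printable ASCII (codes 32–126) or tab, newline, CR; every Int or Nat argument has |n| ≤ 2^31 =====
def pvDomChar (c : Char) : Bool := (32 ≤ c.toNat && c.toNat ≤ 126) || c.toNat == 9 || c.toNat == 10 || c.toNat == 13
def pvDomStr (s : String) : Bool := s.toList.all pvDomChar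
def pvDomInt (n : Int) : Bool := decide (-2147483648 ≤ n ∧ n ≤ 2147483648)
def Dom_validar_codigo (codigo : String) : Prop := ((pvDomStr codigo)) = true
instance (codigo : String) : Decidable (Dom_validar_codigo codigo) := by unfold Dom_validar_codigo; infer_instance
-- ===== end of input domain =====

-- B replaces A's three independent scans by one single pass with accumulated flags (alternative decomposition, same cost).


-- ===== PORT A =====
def validar_codigo (codigo : String) : Bool :=
  if PySem.Str.len codigo < 6 then false
  else if !(codigo.toList.any PySem.Chars.isupper) then false
  else if !(codigo.toList.any PySem.Chars.isdigit) then false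
  else if PySem.Str.isIn " " codigo then false
  else true

-- ===== PORT B =====
-- the single-pass loop of Source B: early-return false on ' ', otherwise accumulate the two flags
def validar_codigo_loop : List Char → Bool → Bool → Bool
  | [], has_upper, has_digit => has_upper && has_digit
  | c :: rest, has_upper, has_digit =>
    if c = ' ' then false
    else validar_codigo_loop rest
      (if PySem.Chars.isupper c then true else has_upper)
      (if PySem.Chars.isdigit c then true else has_digit)

def validar_codigo_alt (codigo : String) : Bool :=
  if PySem.Str.len codigo < 6 then false
  else validar_codigo_loop codigo.toList false false

-- ===== PRECONDITION & SPEC =====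
def Spec_validar_codigo (codigo : String) (out : Bool) : Prop := out = validar_codigo_alt codigo
instance (codigo : String) (out : Bool) : Decidable (Spec_validar_codigo codigo out) := by unfold Spec_validar_codigo; infer_instance

-- ===== CLAIM (what is proved, stated in full; the proofs are below) =====
def Claim_equal_validar_codigo : Prop := ∀ (codigo : String), Dom_validar_codigo codigo → Spec_validar_codigo codigo (validar_codigo codigo)

-- ===== LEMMAS AND PROOFS =====

-- characterisation of the single-pass loop
theorem validar_codigo_loop_eq (cs : List Char) (hu hd : Bool) :
    validar_codigo_loop cs hu hd =
      (!cs.contains ' ' && (hu || cs.any PySem.Chars.isupper) && (hd || cs.any PySem.Chars.isdigit)) := by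
  induction cs generalizing hu hd with
  | nil => simp [validar_codigo_loop]
  | cons c rest ih =>
    by_cases h : c = ' '
    · subst h; simp [validar_codigo_loop]
    · simp only [validar_codigo_loop, if_neg h, ih, List.contains_cons, List.any_cons]
      have hc : (' ' == c) = false := by simp [Ne.symm h]
      rw [hc]
      generalize PySem.Chars.isupper c = b1
      generalize PySem.Chars.isdigit c = b2
      generalize rest.contains ' ' = b3
      generalize rest.any PySem.Chars.isupper = b4
      generalize rest.any PySem.Chars.isdigit = b5
      cases b1 <;> cases b2 <;> cases b3 <;> cases b4 <;> cases b5 <;> cases hu <;> cases hd <;> rfl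

-- the substring test " " in s is membership of ' '
theorem isIn_space_eq_contains (s : String) :
    PySem.Str.isIn " " s = s.toList.contains ' ' := by
  rcases h : s.toList.contains ' ' with _ | _
  · rcases hi : PySem.Str.isIn " " s with _ | _
    · rfl
    · exfalso
      have hinf := (PySem.Str.isIn_iff_infix " " s).mp hi
      have : ' ' ∈ s.toList := hinf.subset (by decide)
      simp_all
  · rw [PySem.Str.isIn_iff_infix]
    have hm : ' ' ∈ s.toList := by simp_all
    obtain ⟨l, r, hlr⟩ := List.append_of_mem hm
    exact ⟨l, r, by simp [hlr]⟩

-- ===== VERDICT (by name: the statement is the Claim_ definition above) =====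
theorem validar_codigo_spec : Claim_equal_validar_codigo := by
  intro codigo _
  unfold Spec_validar_codigo validar_codigo validar_codigo_alt
  by_cases hl : PySem.Str.len codigo < 6
  · rw [if_pos hl, if_pos hl]
  · rw [if_neg hl, if_neg hl, validar_codigo_loop_eq, isIn_space_eq_contains]
    cases hu : codigo.toList.any PySem.Chars.isupper <;>
      cases hd : codigo.toList.any PySem.Chars.isdigit <;>
      cases hs : codigo.toList.contains ' ' <;> simp
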